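-- pv_equiv track=rewrite | github.com/www-chengxuyuancd-com/shangji-bao | src/notify/engine.py | _find_matched_regions
-- ===== SOURCE A (Python) =====
-- def _find_matched_regions(title: str, content: str, all_region_names: set) -> str:
--     """在标题和正文中查找匹配到的配置地区，返回逗号分隔的地区名。"""
--     text = f"{title or ''} {content or ''}"
--     matched = [name for name in all_region_names if name in text]
--     matched.sort(key=lambda n: text.index(n))
--     seen = []
--     for m in matched:
--         if m not in seen:
--             seen.append(m)
--     return ",".join(seen[:5]) if seen else ""
-- ===== SOURCE B (Python) =====
-- def _find_matched_regions(title: str, content: str, all_region_names: set) -> str: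
--     """Bucket-sort by first occurrence: dedup names first, locate each with one
--     str.find, drop it into the bucket of its first index, then read the buckets
--     in order (no comparison sort, no second substring scan)."""
--     text = f"{title or ''} {content or ''}"
--     buckets = [[] for _ in range(len(text))]
--     for name in dict.fromkeys(all_region_names):
--         i = text.find(name)
--         if i >= 0:
--             buckets[i].append(name)
--     out = []
--     for b in buckets:
--         out.extend(b)
--     return ",".join(out[:5])
-- ===== Notes on version B (the rewrite author's own statement) =====
-- stated objective: alternative
-- what changed: A filters the names by substring test, comparison-sorts the survivors by text.index (a second substring scan per name) and deduplicates afterwards; B deduplicates first, locates each distinct name with a single str.find, and replaces the comparison sort by a bucket (counting) sort over text positions read off in order.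
import Mathlib
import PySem

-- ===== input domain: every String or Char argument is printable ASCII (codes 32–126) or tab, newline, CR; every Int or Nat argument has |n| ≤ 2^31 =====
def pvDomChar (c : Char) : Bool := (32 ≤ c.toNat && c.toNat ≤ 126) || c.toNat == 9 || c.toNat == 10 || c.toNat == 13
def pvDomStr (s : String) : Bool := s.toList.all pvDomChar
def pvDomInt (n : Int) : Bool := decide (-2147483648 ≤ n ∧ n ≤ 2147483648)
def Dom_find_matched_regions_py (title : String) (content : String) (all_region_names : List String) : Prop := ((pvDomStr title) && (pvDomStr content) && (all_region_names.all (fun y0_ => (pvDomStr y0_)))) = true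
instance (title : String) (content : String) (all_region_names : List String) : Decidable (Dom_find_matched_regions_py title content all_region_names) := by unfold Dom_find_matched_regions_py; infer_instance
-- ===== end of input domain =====

-- B replaces A's filter + comparison sort by first index + dedup-after with dedup-first, one
-- str.find per distinct name, and a bucket (counting) sort by position (objective: alternative).

-- ===== PORT A =====
-- text = f"{title or ''} {content or ''}"  ('x or ""' is the identity on strings);
-- 'name in text' = Chars.isIn; matched.sort(key=lambda n: text.index(n)) = stable sort with
-- key Chars.find (exact: every element of matched occurs in text, so index = find, no ValueError).
def find_matched_regions_py (title : String) (content : String) (all_region_names : List String) : String :=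
  let text := title.toList ++ ' ' :: content.toList
  let matched := all_region_names.filter (fun name => PySem.Chars.isIn name.toList text)
  let matched := PySem.List.sorted matched (fun n => PySem.Chars.find text n.toList) false
  let seen := matched.foldl (fun seen m => if m ∈ seen then seen else seen ++ [m]) []
  if seen.isEmpty then "" else PySem.Str.join "," (PySem.List.slice seen none (some 5))

-- ===== PORT B =====
-- buckets[i].append(name) ported as functional set/getD at index i.toNat: exact because
-- 0 ≤ i = text.find(name) < len(text) whenever i ≥ 0 (text is nonempty, it contains ' ').
def find_matched_regions_py_alt (title : String) (content : String) (all_region_names : List String) : String :=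
  let text := title.toList ++ ' ' :: content.toList
  let buckets := (PySem.List.pyRange 0 (text.length : Int) 1).map (fun _ => ([] : List String))
  let buckets := (PySem.List.dedup all_region_names).foldl (fun bs name =>
      let i := PySem.Chars.find text name.toList
      if 0 ≤ i then bs.set i.toNat (bs.getD i.toNat [] ++ [name]) else bs) buckets
  let out := buckets.foldl (fun acc b => acc ++ b) []
  PySem.Str.join "," (PySem.List.slice out none (some 5))

-- ===== PRECONDITION & SPEC =====
def Spec_find_matched_regions_py (title : String) (content : String) (all_region_names : List String) (out : String) : Prop := out = find_matched_regions_py_alt title content all_region_names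
instance (title : String) (content : String) (all_region_names : List String) (out : String) : Decidable (Spec_find_matched_regions_py title content all_region_names out) := by unfold Spec_find_matched_regions_py; infer_instance

-- ===== CLAIM (what is proved, stated in full; the proofs are below) =====
def Claim_equal_find_matched_regions_py : Prop := ∀ (title : String) (content : String) (all_region_names : List String), Dom_find_matched_regions_py title content all_region_names → Spec_find_matched_regions_py title content all_region_names (find_matched_regions_py title content all_region_names)

-- ===== LEMMAS AND PROOFS =====


theorem pv_insertBy_boundary {α : Type} (before : α → α → Bool) (x : α) (L1 L2 : List α)
    (h1 : ∀ y ∈ L1, before x y = false) (h2 : ∀ y ∈ L2, before x y = true) :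
    PySem.List.insertBy before x (L1 ++ L2) = L1 ++ x :: L2 := by
  induction L1 with
  | nil =>
    cases L2 with
    | nil => rfl
    | cons z zs => simp [PySem.List.insertBy, h2 z (by simp)]
  | cons y ys ih =>
    have hy : before x y = false := h1 y (by simp)
    simp only [List.cons_append, PySem.List.insertBy, hy]
    simp [ih (fun y hy => h1 y (by simp [hy]))]

theorem pv_pyRange_nat (n : Nat) :
    PySem.List.pyRange 0 (n : Int) 1 = (List.range n).map (fun (j : Nat) => (j : Int)) := by
  induction n with
  | zero => rfl
  | succ m ih =>
    rw [PySem.List.pyRange_one_append 0 (m : Int) ((m+1 : Nat) : Int) (by positivity) (by exact_mod_cast Nat.le_succ m)]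
    rw [ih, PySem.List.pyRange_one_cons (by exact_mod_cast Nat.lt_succ_self m)]
    simp [List.range_succ]


theorem pv_add_eq (s : List String) (m : String) :
    PySem.Set.add s m = if m ∈ s then s else s ++ [m] := by
  simp [PySem.Set.add, PySem.Set.contains]

theorem pv_seen_eq_dedup (xs : List String) :
    xs.foldl (fun seen m => if m ∈ seen then seen else seen ++ [m]) []
      = PySem.List.dedup xs := by
  have : ∀ acc : List String,
      xs.foldl (fun seen m => if m ∈ seen then seen else seen ++ [m]) acc
        = xs.foldl PySem.Set.add acc := by
    intro acc
    induction xs generalizing acc with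
    | nil => rfl
    | cons x xs ih => simp only [List.foldl_cons, pv_add_eq, ih]
  simp [this, PySem.List.dedup, PySem.Set.ofList, PySem.Set.empty]

theorem pv_foldl_add_filter (p : String → Bool) (xs acc : List String) :
    (List.foldl PySem.Set.add acc xs).filter p
      = List.foldl PySem.Set.add (acc.filter p) (xs.filter p) := by
  induction xs generalizing acc with
  | nil => rfl
  | cons x xs ih =>
    by_cases hp : p x
    · have : (PySem.Set.add acc x).filter p = PySem.Set.add (acc.filter p) x := by
        rw [pv_add_eq, pv_add_eq]
        by_cases hm : x ∈ acc
        · simp [hm, List.mem_filter.mpr ⟨hm, hp⟩]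
        · have : x ∉ acc.filter p := fun h => hm (List.mem_filter.mp h).1
          simp [hm, this, List.filter_append, hp]
      simp only [List.foldl_cons, List.filter_cons, hp, ih, this]
      simp
    · have : (PySem.Set.add acc x).filter p = acc.filter p := by
        rw [pv_add_eq]
        by_cases hm : x ∈ acc
        · simp [hm]
        · simp [hm, List.filter_append, hp]
      simp only [List.foldl_cons, List.filter_cons, ih, this]
      simp [hp]

theorem pv_dedup_filter (p : String → Bool) (xs : List String) :
    PySem.List.dedup (xs.filter p) = (PySem.List.dedup xs).filter p := by
  simp [PySem.List.dedup, PySem.Set.ofList, PySem.Set.empty, pv_foldl_add_filter]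

theorem pv_foldl_add_disjoint (a : List String) (b : List String) (acc₂ : List String)
    (h : ∀ x ∈ b, x ∉ a) :
    List.foldl PySem.Set.add (a ++ acc₂) b = a ++ List.foldl PySem.Set.add acc₂ b := by
  induction b generalizing acc₂ with
  | nil => rfl
  | cons x xs ih =>
    have hx : x ∉ a := h x (by simp)
    have : PySem.Set.add (a ++ acc₂) x = a ++ PySem.Set.add acc₂ x := by
      rw [pv_add_eq, pv_add_eq]
      by_cases hm : x ∈ acc₂ <;> simp [hm, hx]
    simp only [List.foldl_cons, this]
    exact ih _ (fun y hy => h y (by simp [hy]))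

theorem pv_dedup_append_disjoint (a b : List String) (h : ∀ x ∈ b, x ∉ a) :
    PySem.List.dedup (a ++ b) = PySem.List.dedup a ++ PySem.List.dedup b := by
  have hsub : ∀ x ∈ b, x ∉ PySem.List.dedup a := fun x hx hmem =>
    h x hx ((PySem.List.mem_dedup a x).mp hmem)
  simp only [PySem.List.dedup, PySem.Set.ofList, PySem.Set.empty, List.foldl_append]
  have := pv_foldl_add_disjoint (List.foldl PySem.Set.add [] a) b [] hsub
  simpa using this

theorem pv_dedup_flatMap (xs : List String) (k : String → Int) (js : List Nat) (hnd : js.Nodup) :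
    PySem.List.dedup (js.flatMap (fun (j : Nat) => xs.filter (fun x => k x == (j : Int))))
      = js.flatMap (fun (j : Nat) => PySem.List.dedup (xs.filter (fun x => k x == (j : Int)))) := by
  induction js with
  | nil => rfl
  | cons j js ih =>
    have hnd' := hnd.of_cons
    have hj : j ∉ js := by simp at hnd; exact hnd.1
    have hdisj : ∀ x ∈ js.flatMap (fun (j' : Nat) => xs.filter (fun x => k x == (j' : Int))),
        x ∉ xs.filter (fun x => k x == (j : Int)) := by
      intro x hx hmem
      rcases List.mem_flatMap.mp hx with ⟨j', hj', hx'⟩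
      have e1 : k x = (j' : Int) := by simpa using (List.mem_filter.mp hx').2
      have e2 : k x = (j : Int) := by simpa using (List.mem_filter.mp hmem).2
      have hjj : j = j' := by exact_mod_cast e2.symm.trans e1
      subst hjj; exact hj hj'
    rw [List.flatMap_cons, pv_dedup_append_disjoint _ _ hdisj, ih hnd', List.flatMap_cons]

theorem pv_sorted_eq_buckets (xs : List String) (k : String → Int) (N : Nat)
    (hb : ∀ x ∈ xs, 0 ≤ k x ∧ k x < (N : Int)) :
    PySem.List.sorted xs k false
      = (List.range N).flatMap (fun (j : Nat) => xs.filter (fun x => k x == (j : Int))) := by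
  induction xs using List.reverseRecOn with
  | nil => simp [PySem.List.sorted]
  | append_singleton xs x ih =>
    have hx := hb x (by simp)
    have hxs : ∀ y ∈ xs, 0 ≤ k y ∧ k y < (N : Int) := fun y hy => hb y (by simp [hy])
    rw [PySem.List.sorted_eq_foldl_insertBy, List.foldl_append, ← PySem.List.sorted_eq_foldl_insertBy,
      ih hxs]
    set j0 : Nat := (k x).toNat with hj0
    have hkx : k x = (j0 : Int) := by omega
    have hj0N : j0 + 1 ≤ N := by omega
    clear_value j0
    have hsplit : List.range N = List.range (j0+1) ++ (List.range (N - (j0+1))).map (fun i => j0+1+i) := by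
      have : N = (j0+1) + (N - (j0+1)) := by omega
      rw [this, List.range_add]
      simp
    -- decompose into the kept-before part and the pushed-back part
    simp only [List.foldl_cons, List.foldl_nil]
    rw [hsplit, List.flatMap_append, List.flatMap_append]
    have h1 : ∀ y ∈ (List.range (j0+1)).flatMap (fun (j : Nat) => xs.filter (fun y => k y == (j : Int))),
        decide (k x < k y) = false := by
      intro y hy
      rcases List.mem_flatMap.mp hy with ⟨j, hj, hy'⟩
      have : k y = (j : Int) := by simpa using (List.mem_filter.mp hy').2
      have : k y ≤ k x := by
        have := List.mem_range.mp hj; omega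
      simpa using not_lt.mpr this
    have h2 : ∀ y ∈ ((List.range (N - (j0+1))).map (fun i => j0+1+i)).flatMap
          (fun (j : Nat) => xs.filter (fun y => k y == (j : Int))),
        decide (k x < k y) = true := by
      intro y hy
      rcases List.mem_flatMap.mp hy with ⟨j, hj, hy'⟩
      have : k y = (j : Int) := by simpa using (List.mem_filter.mp hy').2
      have hj' : j0 + 1 ≤ j := by
        rcases List.mem_map.mp hj with ⟨i, _, rfl⟩; omega
      have : k x < k y := by omega
      simpa using this
    rw [pv_insertBy_boundary _ x _ _ h1 h2]
    -- now compare bucket by bucket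
    have e1 : (List.range (j0+1)).flatMap (fun (j : Nat) => (xs ++ [x]).filter (fun y => k y == (j : Int)))
        = (List.range (j0+1)).flatMap (fun (j : Nat) => xs.filter (fun y => k y == (j : Int))) ++ [x] := by
      rw [List.range_succ, List.flatMap_append, List.flatMap_append]
      have ej : ∀ j ∈ List.range j0, (xs ++ [x]).filter (fun y => k y == (j : Int))
          = xs.filter (fun y => k y == (j : Int)) := by
        intro j hj
        have := List.mem_range.mp hj
        rw [List.filter_append]
        have : (k x == (j : Int)) = false := by simp; omega
        simp [this]
      rw [List.flatMap_congr ej]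
      have : (xs ++ [x]).filter (fun y => k y == (j0 : Int)) = xs.filter (fun y => k y == (j0 : Int)) ++ [x] := by
        rw [List.filter_append]
        have : (k x == (j0 : Int)) = true := by simp only [beq_iff_eq]; exact hkx
        simp [this]
      rw [List.flatMap_singleton, List.flatMap_singleton, this, List.append_assoc]
    have e2 : ((List.range (N - (j0+1))).map (fun i => j0+1+i)).flatMap
          (fun (j : Nat) => (xs ++ [x]).filter (fun y => k y == (j : Int)))
        = ((List.range (N - (j0+1))).map (fun i => j0+1+i)).flatMap
          (fun (j : Nat) => xs.filter (fun y => k y == (j : Int))) := by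
      apply List.flatMap_congr
      intro j hj
      rcases List.mem_map.mp hj with ⟨i, _, rfl⟩
      rw [List.filter_append]
      have hne : ¬ (k x = (j0:Int) + 1 + (i:Int)) := by rw [hkx]; omega
      simp [hne]
    rw [e1, e2]
    simp


theorem pv_find_lt_length (t : List Char) (ht : t ≠ []) (n : List Char)
    (hm : PySem.Chars.isIn n t = true) :
    0 ≤ PySem.Chars.find t n ∧ PySem.Chars.find t n < (t.length : Int) := by
  have h0 : 0 ≤ PySem.Chars.find t n := by
    have := (PySem.Chars.find_nonneg_iff t n).mpr ((PySem.Chars.isIn_iff_infix n t).mp hm)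
    exact this
  refine ⟨h0, ?_⟩
  have hle := PySem.Chars.find_le_length t n
  rcases lt_or_eq_of_le hle with h | h
  · exact h
  · exfalso
    have hspec := PySem.Chars.find_spec h0
    have : n <+: List.drop (PySem.Chars.find t n).toNat t := hspec.1
    rw [h] at this
    simp at this
    subst this
    rw [PySem.Chars.find_nil] at h
    have : t.length = 0 := by omega
    exact ht (List.eq_nil_of_length_eq_zero this)

theorem pv_buckets_fold (t : List Char) (ds : List String) :
    ds.foldl (fun bs name =>
        let i := PySem.Chars.find t name.toList
        if 0 ≤ i then bs.set i.toNat (bs.getD i.toNat [] ++ [name]) else bs)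
      ((List.range t.length).map (fun _ => ([] : List String)))
      = (List.range t.length).map
          (fun (j : Nat) => ds.filter (fun n => PySem.Chars.find t n.toList == (j : Int))) := by
  induction ds using List.reverseRecOn with
  | nil => simp
  | append_singleton ds x ih =>
    rw [List.foldl_append, ih, List.foldl_cons, List.foldl_nil]
    by_cases hge : 0 ≤ PySem.Chars.find t x.toList
    · set i0 : Nat := (PySem.Chars.find t x.toList).toNat with hi0
      have hkx : PySem.Chars.find t x.toList = (i0 : Int) := by omega
      by_cases hlt : i0 < t.length
      · simp only [hge, if_pos]
        apply List.ext_getElem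
        · simp
        intro j hj1 hj2
        simp only [List.length_set, List.length_map, List.length_range] at hj1
        rw [List.getElem_set]
        by_cases hji : i0 = j
        · subst hji
          have hget : ((List.range t.length).map
              (fun (j : Nat) => ds.filter (fun n => PySem.Chars.find t n.toList == (j : Int)))).getD i0 []
              = ds.filter (fun n => PySem.Chars.find t n.toList == (i0 : Int)) := by
            rw [List.getD_eq_getElem?_getD]
            simp [hlt]
          rw [if_pos rfl, hget]
          rw [List.getElem_map, List.getElem_range]
          rw [List.filter_append]
          have : (PySem.Chars.find t x.toList == (i0 : Int)) = true := by simp [hkx]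
          simp [this]
        · rw [if_neg hji]
          simp only [List.getElem_map, List.getElem_range]
          rw [List.filter_append]
          have : (PySem.Chars.find t x.toList == (j : Int)) = false := by
            simp only [beq_eq_false_iff_ne, ne_eq, hkx]
            intro hcast
            exact hji (by exact_mod_cast hcast)
          simp [this]
      · -- i0 ≥ length: set is out of range, a no-op, and no bucket can hold x
        simp only [hge, if_pos]
        rw [List.set_eq_of_length_le (by simp; omega)]
        apply List.map_congr_left
        intro j hj
        rw [List.filter_append]
        have : (PySem.Chars.find t x.toList == (j : Int)) = false := by
          simp only [beq_eq_false_iff_ne, ne_eq, hkx]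
          intro hcast
          have := List.mem_range.mp hj
          have : j = i0 := by exact_mod_cast hcast.symm
          omega
        simp [this]
    · simp only [hge, if_false]
      apply List.map_congr_left
      intro j hj
      rw [List.filter_append]
      have : (PySem.Chars.find t x.toList == (j : Int)) = false := by
        simp only [beq_eq_false_iff_ne, ne_eq]
        intro hcast
        rw [hcast] at hge
        exact hge (by positivity)
      simp [this]

theorem pv_core (t : List Char) (ht : t ≠ []) (names : List String) :
    PySem.List.dedup
        (PySem.List.sorted (names.filter (fun name => PySem.Chars.isIn name.toList t))
          (fun n => PySem.Chars.find t n.toList) false)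
      = (List.range t.length).flatMap
          (fun (j : Nat) => (PySem.List.dedup names).filter
            (fun n => PySem.Chars.find t n.toList == (j : Int))) := by
  have hb : ∀ x ∈ names.filter (fun name => PySem.Chars.isIn name.toList t),
      0 ≤ PySem.Chars.find t x.toList ∧ PySem.Chars.find t x.toList < (t.length : Int) := by
    intro x hx
    exact pv_find_lt_length t ht x.toList (List.mem_filter.mp hx).2
  rw [pv_sorted_eq_buckets _ _ t.length hb,
    pv_dedup_flatMap _ _ (List.range t.length) (List.nodup_range)]
  apply List.flatMap_congr
  intro j hj
  rw [pv_dedup_filter, pv_dedup_filter, List.filter_filter]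
  apply List.filter_congr
  intro x hx
  by_cases hq : PySem.Chars.find t x.toList = (j : Int)
  · have hne : PySem.Chars.find t x.toList ≠ -1 := by rw [hq]; omega
    have hPx : PySem.Chars.isIn x.toList t = true := by simpa [PySem.Chars.isIn] using hne
    simp [hq, hPx]
  · simp [hq]

theorem pv_text_ne_nil (title content : String) :
    title.toList ++ ' ' :: content.toList ≠ [] := by
  cases h : title.toList <;> simp

theorem pv_join_empty : PySem.Str.join "," ([] : List String) = "" := by
  simp [PySem.Str.join, PySem.Chars.join, List.intercalate]

-- ===== VERDICT (by name: the statement is the Claim_ definition above) =====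
theorem find_matched_regions_py_spec : Claim_equal_find_matched_regions_py := by
  intro title content names _
  unfold Spec_find_matched_regions_py find_matched_regions_py find_matched_regions_py_alt
  simp only []
  set t : List Char := title.toList ++ ' ' :: content.toList with htdef
  have ht : t ≠ [] := pv_text_ne_nil title content
  -- A's seen list and B's flattened buckets are the same canonical list
  have hA : (PySem.List.sorted (names.filter (fun name => PySem.Chars.isIn name.toList t))
        (fun n => PySem.Chars.find t n.toList) false).foldl
          (fun seen m => if m ∈ seen then seen else seen ++ [m]) []
      = (List.range t.length).flatMap
          (fun (j : Nat) => (PySem.List.dedup names).filter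
            (fun n => PySem.Chars.find t n.toList == (j : Int))) := by
    rw [pv_seen_eq_dedup, pv_core t ht names]
  have hinit : (PySem.List.pyRange 0 (t.length : Int) 1).map (fun _ => ([] : List String))
      = (List.range t.length).map (fun _ => ([] : List String)) := by
    rw [pv_pyRange_nat, List.map_map]
    rfl
  have hB : ((PySem.List.dedup names).foldl (fun bs name =>
        let i := PySem.Chars.find t name.toList
        if 0 ≤ i then bs.set i.toNat (bs.getD i.toNat [] ++ [name]) else bs)
      ((PySem.List.pyRange 0 (t.length : Int) 1).map (fun _ => ([] : List String)))).foldl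
        (fun acc b => acc ++ b) []
      = (List.range t.length).flatMap
          (fun (j : Nat) => (PySem.List.dedup names).filter
            (fun n => PySem.Chars.find t n.toList == (j : Int))) := by
    rw [hinit, pv_buckets_fold t (PySem.List.dedup names)]
    rw [PySem.List.foldl_append_eq_flatMap (fun b => b)]
    rw [List.flatMap_map]
    rfl
  rw [hA, hB]
  cases hC : (List.range t.length).flatMap
      (fun (j : Nat) => (PySem.List.dedup names).filter
        (fun n => PySem.Chars.find t n.toList == (j : Int))) with
  | nil =>
    have h5 : PySem.List.slice ([] : List String) none (some 5) = [] := by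
      rw [PySem.List.slice_to ([] : List String) (by omega : (0:Int) ≤ 5)]
      simp
    simp [h5, pv_join_empty]
  | cons c cs => simp
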